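-- pv_equiv track=rewrite | github.com/tielec/infrastructure-as-code | jenkins/jobs/pipeline/docs-generator/auto-insert-doxygen-comment/src/languages/typescript/parser.py | _find_balanced_block
-- ===== SOURCE A (Python) =====
-- from typing import Dict, List, Optional, Union, Any, Set
--
-- def _find_balanced_block(source_lines: List[str], start_line: int, open_char='{', close_char='}') -> int:
--     """括弧で囲まれたブロックの終了行を見つける
--
--     Args:
--         source_lines (List[str]): ソースコードの行のリスト
--         start_line (int): 開始行インデックス
--         open_char (str): 開始括弧文字
--         close_char (str): 終了括弧文字
--
--     Returns:
--         int: ブロックの終了行インデックス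
--     """
--     i = start_line
--     balance = 0
--     open_found = False
--
--     # 最初の開き括弧を見つける
--     while i < len(source_lines) and not open_found:
--         if open_char in source_lines[i]:
--             open_found = True
--             balance = source_lines[i].count(open_char) - source_lines[i].count(close_char)
--         i += 1
--
--     if not open_found:
--         return start_line
--
--     # バランスが取れるまで探索
--     while i < len(source_lines) and balance > 0:
--         line = source_lines[i]
--         balance += line.count(open_char) - line.count(close_char)
--
--         if balance == 0:
--             return i
--
--         i += 1
--
--     # バランスが取れなかった場合は開始行を返す
--     return start_line
-- ===== SOURCE B (Python) =====
-- def _find_balanced_block(source_lines, start_line, open_char='{', close_char='}'):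
--     """Table-driven rewrite: precompute per-line deltas, locate the opening
--     line, then decide the end line from the prefix sums of the deltas."""
--     n = len(source_lines)
--     deltas = [line.count(open_char) - line.count(close_char) for line in source_lines]
--
--     o = next((k for k in range(start_line, n) if open_char in source_lines[k]), None)
--     if o is None:
--         return start_line
--
--     # running balances from the opening line on: sums[j] = balance after line o+j
--     sums = []
--     s = 0
--     for k in range(o, n):
--         s += deltas[k]
--         sums.append(s)
--
--     end = next((j for j in range(1, len(sums)) if sums[j] == 0), None)
--     if end is not None and all(sums[j] > 0 for j in range(end)):
--         return o + end
--     return start_line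
-- ===== Notes on version B (the rewrite author's own statement) =====
-- stated objective: alternative
-- what changed: A scans with two stateful while-loops recounting brackets as it goes; B precomputes a per-line delta table, locates the opening line with next() over a range, builds the list of running balances (prefix sums) from that line on, and decides the end line by finding the first zero balance and checking all earlier balances are positive.
import Mathlib
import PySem

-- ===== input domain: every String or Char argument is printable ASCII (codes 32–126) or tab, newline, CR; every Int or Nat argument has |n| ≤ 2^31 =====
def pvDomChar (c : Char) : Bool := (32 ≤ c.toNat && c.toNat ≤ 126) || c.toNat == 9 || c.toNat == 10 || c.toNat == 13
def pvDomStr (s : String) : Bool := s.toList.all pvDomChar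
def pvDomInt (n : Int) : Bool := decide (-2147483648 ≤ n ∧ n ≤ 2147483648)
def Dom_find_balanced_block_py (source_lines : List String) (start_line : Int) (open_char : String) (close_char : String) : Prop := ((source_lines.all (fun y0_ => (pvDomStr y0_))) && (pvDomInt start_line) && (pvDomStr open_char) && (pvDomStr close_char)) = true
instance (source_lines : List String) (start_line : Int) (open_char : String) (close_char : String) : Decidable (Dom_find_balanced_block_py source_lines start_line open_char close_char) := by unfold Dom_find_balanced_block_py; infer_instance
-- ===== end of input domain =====

-- B replaces A's two stateful while-loops by a precomputed per-line delta table,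
-- a range search for the opening line, and a find-first-zero over the prefix sums
-- of the deltas (objective: alternative decomposition, same cost).


-- ===== PORT A =====
-- first while-loop of A: advance i until a line containing open_char is found;
-- on success return (i+1, initial balance); none = not found (or, outside Pre_, IndexError)
def pvFindOpen (source_lines : List String) (open_char close_char : String) (i : Int) :
    Option (Int × Int) :=
  if _h : i < (source_lines.length : Int) then
    match PySem.List.pyGet? source_lines i with
    | none => none   -- IndexError in Python; excluded by Pre_
    | some line =>
      if PySem.Str.isIn open_char line then
        some (i + 1, (PySem.Str.count line open_char : Int) - (PySem.Str.count line close_char : Int))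
      else pvFindOpen source_lines open_char close_char (i + 1)
  else none
termination_by ((source_lines.length : Int) - i).toNat
decreasing_by omega

-- second while-loop of A (indices here are in range under Pre_, so getD "" is exact)
def pvScanBal (source_lines : List String) (open_char close_char : String)
    (start_line i balance : Int) : Int :=
  if _h : i < (source_lines.length : Int) ∧ 0 < balance then
    let line := (PySem.List.pyGet? source_lines i).getD ""
    let balance' := balance + ((PySem.Str.count line open_char : Int) - (PySem.Str.count line close_char : Int))
    if balance' = 0 then i
    else pvScanBal source_lines open_char close_char start_line (i + 1) balance'
  else start_line
termination_by ((source_lines.length : Int) - i).toNat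
decreasing_by omega

def find_balanced_block_py (source_lines : List String) (start_line : Int) (open_char : String) (close_char : String) : Int :=
  match pvFindOpen source_lines open_char close_char start_line with
  | none => start_line
  | some (i, balance) => pvScanBal source_lines open_char close_char start_line i balance

-- ===== PORT B =====
def find_balanced_block_py_alt (source_lines : List String) (start_line : Int) (open_char : String) (close_char : String) : Int :=
  let n : Int := source_lines.length
  let deltas : List Int := source_lines.map (fun line =>
    (PySem.Str.count line open_char : Int) - (PySem.Str.count line close_char : Int))
  match (PySem.List.pyRange start_line n 1).find?
      (fun k => PySem.Str.isIn open_char ((PySem.List.pyGet? source_lines k).getD "")) with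
  | none => start_line
  | some o =>
    -- running balances from the opening line on: sums[j] = balance after line o+j
    let sums : List Int := ((PySem.List.pyRange o n 1).foldl
      (fun (acc : List Int × Int) k =>
        let s := acc.2 + (PySem.List.pyGet? deltas k).getD 0
        (acc.1 ++ [s], s)) ([], 0)).1
    match (PySem.List.pyRange 1 (sums.length : Int) 1).find?
        (fun j => (PySem.List.pyGet? sums j).getD 0 == 0) with
    | none => start_line
    | some e =>
      if (PySem.List.pyRange 0 e 1).all (fun j => decide (0 < (PySem.List.pyGet? sums j).getD 0))
      then o + e else start_line

-- ===== PRECONDITION & SPEC =====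
-- Pre_ excludes exactly the inputs where Python A raises IndexError:
-- start_line < -len(source_lines) makes A's first subscript source_lines[start_line] raise.
def Pre_find_balanced_block_py (source_lines : List String) (start_line : Int) (open_char : String) (close_char : String) : Prop :=
  -(source_lines.length : Int) ≤ start_line
instance (source_lines : List String) (start_line : Int) (open_char : String) (close_char : String) : Decidable (Pre_find_balanced_block_py source_lines start_line open_char close_char) := by unfold Pre_find_balanced_block_py; infer_instance

def pvWitness_find_balanced_block_py : List String × Int × String × String :=
  (["def f() {", "  g();", "}"], 0, "{", "}")

def Spec_find_balanced_block_py (source_lines : List String) (start_line : Int) (open_char : String) (close_char : String) (out : Int) : Prop := out = find_balanced_block_py_alt source_lines start_line open_char close_char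
instance (source_lines : List String) (start_line : Int) (open_char : String) (close_char : String) (out : Int) : Decidable (Spec_find_balanced_block_py source_lines start_line open_char close_char out) := by unfold Spec_find_balanced_block_py; infer_instance

-- ===== CLAIM (what is proved, stated in full; the proofs are below) =====
def Claim_equal_find_balanced_block_py : Prop := ∀ (source_lines : List String) (start_line : Int) (open_char : String) (close_char : String), Dom_find_balanced_block_py source_lines start_line open_char close_char → Pre_find_balanced_block_py source_lines start_line open_char close_char → Spec_find_balanced_block_py source_lines start_line open_char close_char (find_balanced_block_py source_lines start_line open_char close_char)

-- ===== LEMMAS AND PROOFS =====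

-- delta of the line at (possibly negative, wrapped) index k
def pvDelta (source_lines : List String) (open_char close_char : String) (k : Int) : Int :=
  (PySem.Str.count ((PySem.List.pyGet? source_lines k).getD "") open_char : Int)
    - (PySem.Str.count ((PySem.List.pyGet? source_lines k).getD "") close_char : Int)

-- prefix sums of g over a list of indices, starting from s0
def pvScanSums (g : Int → Int) (s0 : Int) : List Int → List Int
  | [] => []
  | k :: ks => (s0 + g k) :: pvScanSums g (s0 + g k) ks

lemma pvFoldl_scan (g : Int → Int) (ks : List Int) (acc : List Int) (s0 : Int) :
    ks.foldl (fun (p : List Int × Int) k =>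
      let s := p.2 + g k
      (p.1 ++ [s], s)) (acc, s0)
    = (acc ++ pvScanSums g s0 ks, (pvScanSums g s0 ks).getLastD s0) := by
  induction ks generalizing acc s0 with
  | nil => simp [pvScanSums]
  | cons k ks ih =>
    simp only [List.foldl_cons, pvScanSums, ih, List.getLastD_cons, List.append_assoc,
      List.singleton_append]

lemma pvScanSums_length (g : Int → Int) (s0 : Int) (ks : List Int) :
    (pvScanSums g s0 ks).length = ks.length := by
  induction ks generalizing s0 with
  | nil => rfl
  | cons k ks ih => simp [pvScanSums, ih]

lemma pvScanSums_getElem_zero (g : Int → Int) (s0 : Int) (ks : List Int)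
    (h : 0 < (pvScanSums g s0 ks).length) :
    (pvScanSums g s0 ks)[0] = s0 + g (ks[0]'(by simpa [pvScanSums_length] using h)) := by
  cases ks with
  | nil => simp [pvScanSums] at h
  | cons k ks => simp [pvScanSums]

lemma pvScanSums_getElem_succ (g : Int → Int) (s0 : Int) (ks : List Int) (j : Nat)
    (h : j + 1 < (pvScanSums g s0 ks).length) :
    (pvScanSums g s0 ks)[j + 1]
      = (pvScanSums g s0 ks)[j]'(by omega)
        + g (ks[j + 1]'(by simpa [pvScanSums_length] using h)) := by
  induction ks generalizing s0 j with
  | nil => simp [pvScanSums] at h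
  | cons k ks ih =>
    cases j with
    | zero =>
      have hlen : 0 < (pvScanSums g (s0 + g k) ks).length := by
        simp [pvScanSums] at h; simpa [pvScanSums_length] using h
      simp [pvScanSums, pvScanSums_getElem_zero _ _ _ hlen]
    | succ j =>
      have h' : j + 1 < (pvScanSums g (s0 + g k) ks).length := by
        simp [pvScanSums] at h; simpa using h
      simp [pvScanSums, ih _ _ h']


lemma pvScanSums_getD_zero (g : Int → Int) (s0 : Int) (ks : List Int)
    (h : 0 < (pvScanSums g s0 ks).length) :
    (pvScanSums g s0 ks).getD 0 0 = s0 + g (ks.getD 0 0) := by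
  rw [List.getD_eq_getElem _ _ h,
    List.getD_eq_getElem _ _ (by simpa [pvScanSums_length] using h)]
  exact pvScanSums_getElem_zero g s0 ks h

lemma pvScanSums_getD_succ (g : Int → Int) (s0 : Int) (ks : List Int) (j : Nat)
    (h : j + 1 < (pvScanSums g s0 ks).length) :
    (pvScanSums g s0 ks).getD (j + 1) 0
      = (pvScanSums g s0 ks).getD j 0 + g (ks.getD (j + 1) 0) := by
  rw [List.getD_eq_getElem _ _ h, List.getD_eq_getElem _ _ (by omega),
    List.getD_eq_getElem _ _ (by simpa [pvScanSums_length] using h)]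
  exact pvScanSums_getElem_succ g s0 ks j h

lemma pvPyRange_getD (a b : Int) (t : Nat) (h : t < (b - a).toNat) :
    (PySem.List.pyRange a b 1).getD t 0 = a + (t : Int) := by
  rw [List.getD_eq_getElem _ _ (by simpa [PySem.List.length_pyRange_one] using h)]
  exact PySem.List.getElem_pyRange_one ..

-- xs.map f indexed like xs
lemma pvPyGet_map (f : String → Int) (xs : List String) (k : Int) :
    PySem.List.pyGet? (xs.map f) k = (PySem.List.pyGet? xs k).map f := by
  simp [PySem.List.pyGet?, PySem.List.pyIdx?]

lemma pvGet_some (sl : List String) (i : Int) (h1 : -(sl.length : Int) ≤ i)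
    (h2 : i < (sl.length : Int)) : ∃ line, PySem.List.pyGet? sl i = some line := by
  have h := PySem.List.pyGet?_eq_none_iff (xs := sl) (i := i)
  cases hg : PySem.List.pyGet? sl i with
  | none => rw [hg] at h; simp [PySem.Raise.InRange] at h; omega
  | some y => exact ⟨y, rfl⟩

lemma pvFindOpen_eq (sl : List String) (oc cc : String) (i : Int)
    (hi : -(sl.length : Int) ≤ i) :
    pvFindOpen sl oc cc i
      = ((PySem.List.pyRange i (sl.length : Int) 1).find?
          (fun k => PySem.Str.isIn oc ((PySem.List.pyGet? sl k).getD ""))).map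
          (fun o => (o + 1, pvDelta sl oc cc o)) := by
  generalize hN : ((sl.length : Int) - i).toNat = N
  induction N generalizing i with
  | zero =>
    have hge : (sl.length : Int) ≤ i := by omega
    rw [pvFindOpen, PySem.List.pyRange_one_eq_nil hge, dif_neg (not_lt.mpr hge)]
    rfl
  | succ N ih =>
    have hlt : i < (sl.length : Int) := by omega
    obtain ⟨line, hline⟩ := pvGet_some sl i hi hlt
    rw [pvFindOpen, dif_pos hlt, PySem.List.pyRange_one_cons hlt, hline]
    dsimp only
    by_cases hin : PySem.Str.isIn oc line
    · rw [if_pos hin, List.find?_cons_of_pos (by simpa [hline] using hin)]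
      simp [pvDelta, hline]
    · rw [if_neg hin, List.find?_cons_of_neg (by simpa [hline] using hin)]
      exact ih (i + 1) (by omega) (by omega)

-- pyGet? on sums, as a Nat-indexed getD
lemma pvPredGetD (sums : List Int) (e : Int) (he : 0 ≤ e) :
    (PySem.List.pyGet? sums e).getD 0 = sums.getD e.toNat 0 := by
  rw [PySem.List.pyGet?_of_nonneg _ he, List.getD_eq_getElem?_getD]

lemma pvScanBal_eq (sl : List String) (oc cc : String) (start o : Int)
    (ho : -(sl.length : Int) ≤ o)
    (sums : List Int)
    (hlen : (sums.length : Int) = (sl.length : Int) - o)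
    (hstep : ∀ t : Nat, t + 1 < sums.length →
      sums.getD (t + 1) 0 = sums.getD t 0 + pvDelta sl oc cc (o + ((t + 1 : Nat) : Int)))
    (j : Nat) (hj1 : 1 ≤ j) (hj2 : j ≤ sums.length)
    (Hpos : ∀ u : Nat, u < j - 1 → 0 < sums.getD u 0)
    (Hnz : ∀ u : Nat, 1 ≤ u → u < j → sums.getD u 0 ≠ 0) :
    pvScanBal sl oc cc start (o + (j : Int)) (sums.getD (j - 1) 0)
      = match (PySem.List.pyRange 1 (sums.length : Int) 1).find?
            (fun t => (PySem.List.pyGet? sums t).getD 0 == 0) with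
        | none => start
        | some e =>
          if (PySem.List.pyRange 0 e 1).all
              (fun u => decide (0 < (PySem.List.pyGet? sums u).getD 0))
          then o + e else start := by
  generalize hN : sums.length - j = N
  induction N generalizing j with
  | zero =>
    have hj : j = sums.length := by omega
    rw [pvScanBal, dif_neg (by rintro ⟨h1, -⟩; omega)]
    cases hfind : (PySem.List.pyRange 1 (sums.length : Int) 1).find?
        (fun t => (PySem.List.pyGet? sums t).getD 0 == 0) with
    | none => rfl
    | some e =>
      exfalso
      have hmem := List.mem_of_find?_eq_some hfind
      rw [PySem.List.mem_pyRange_one] at hmem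
      have hz := List.find?_some hfind
      rw [pvPredGetD sums e (by omega)] at hz
      simp only [beq_iff_eq] at hz
      exact Hnz e.toNat (by omega) (by omega) hz
  | succ N ih =>
    have hjlt : j < sums.length := by omega
    by_cases hbal : 0 < sums.getD (j - 1) 0
    · -- loop body runs
      rw [pvScanBal, dif_pos ⟨by omega, hbal⟩]
      obtain ⟨line, hline⟩ := pvGet_some sl (o + (j : Int)) (by omega) (by omega)
      have hstepj : sums.getD (j - 1) 0
            + ((PySem.Str.count line oc : Int) - (PySem.Str.count line cc : Int))
          = sums.getD j 0 := by
        have h := hstep (j - 1) (by omega)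
        rw [Nat.sub_add_cancel hj1] at h
        rw [h, pvDelta, hline]
        simp only [Option.getD_some]
      dsimp only
      rw [hline]
      simp only [Option.getD_some]
      rw [hstepj]
      by_cases hz : sums.getD j 0 = 0
      · rw [if_pos hz]
        -- find? = some j, all-check passes
        have hsplit : PySem.List.pyRange 1 (sums.length : Int) 1
            = PySem.List.pyRange 1 (j : Int) 1 ++ PySem.List.pyRange (j : Int) (sums.length : Int) 1 :=
          PySem.List.pyRange_one_append 1 (j : Int) (sums.length : Int) (by omega) (by omega)
        have hnone : (PySem.List.pyRange 1 (j : Int) 1).find?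
            (fun t => (PySem.List.pyGet? sums t).getD 0 == 0) = none := by
          apply List.find?_eq_none.mpr
          intro t ht
          rw [PySem.List.mem_pyRange_one] at ht
          rw [pvPredGetD sums t (by omega)]
          simp only [beq_iff_eq]
          exact Hnz t.toNat (by omega) (by omega)
        have hcons : PySem.List.pyRange (j : Int) (sums.length : Int) 1
            = (j : Int) :: PySem.List.pyRange ((j : Int) + 1) (sums.length : Int) 1 :=
          PySem.List.pyRange_one_cons (by omega)
        have hfind : (PySem.List.pyRange 1 (sums.length : Int) 1).find?
            (fun t => (PySem.List.pyGet? sums t).getD 0 == 0) = some (j : Int) := by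
          rw [hsplit, List.find?_append, hnone, Option.none_or, hcons,
            List.find?_cons_of_pos]
          rw [pvPredGetD sums (j : Int) (by omega)]
          simp only [Int.toNat_natCast, beq_iff_eq]
          exact hz
        rw [hfind]
        dsimp only
        have hall : (PySem.List.pyRange 0 (j : Int) 1).all
            (fun u => decide (0 < (PySem.List.pyGet? sums u).getD 0)) = true := by
          apply List.all_eq_true.mpr
          intro u hu
          rw [PySem.List.mem_pyRange_one] at hu
          rw [pvPredGetD sums u (by omega)]
          rcases Nat.lt_or_ge u.toNat (j - 1) with h | h
          · simpa using Hpos u.toNat h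
          · have : u.toNat = j - 1 := by omega
            simpa [this] using hbal
        rw [hall]
        simp
      · rw [if_neg hz]
        have hrec := ih (j + 1) (by omega) (by omega)
          (by intro u hu
              rcases Nat.lt_or_ge u (j - 1) with h | h
              · exact Hpos u h
              · have : u = j - 1 := by omega
                simpa [this] using hbal)
          (by intro u hu1 hu2
              rcases Nat.lt_or_ge u j with h | h
              · exact Hnz u hu1 h
              · have : u = j := by omega
                simpa [this] using hz)
          (by omega)
        have hc1 : ((j + 1 : Nat) : Int) = (j : Int) + 1 := by push_cast; ring
        have hc2 : (j + 1) - 1 = j := by omega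
        rw [hc1, hc2] at hrec
        rw [← hrec]
        ring_nf
    · -- balance not positive: loop exits with start
      rw [pvScanBal, dif_neg (by rintro ⟨-, h2⟩; omega)]
      cases hfind : (PySem.List.pyRange 1 (sums.length : Int) 1).find?
          (fun t => (PySem.List.pyGet? sums t).getD 0 == 0) with
      | none => rfl
      | some e =>
        have hmem := List.mem_of_find?_eq_some hfind
        rw [PySem.List.mem_pyRange_one] at hmem
        have hz := List.find?_some hfind
        rw [pvPredGetD sums e (by omega)] at hz
        simp only [beq_iff_eq] at hz
        have hej : (j : Int) ≤ e := by
          by_contra hcon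
          exact Hnz e.toNat (by omega) (by omega) hz
        have hallf : (PySem.List.pyRange 0 e 1).all
            (fun u => decide (0 < (PySem.List.pyGet? sums u).getD 0)) = false := by
          apply List.all_eq_false.mpr
          refine ⟨((j - 1 : Nat) : Int), ?_, ?_⟩
          · rw [PySem.List.mem_pyRange_one]; omega
          · rw [pvPredGetD sums _ (by omega)]
            simp only [Int.toNat_natCast, decide_eq_true_eq]
            omega
        simp [hallf]

-- ===== VERDICT (by name: the statement is the Claim_ definition above) =====
theorem find_balanced_block_py_spec : Claim_equal_find_balanced_block_py := by
  intro sl start oc cc _hdom hpre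
  unfold Pre_find_balanced_block_py at hpre
  unfold Spec_find_balanced_block_py find_balanced_block_py find_balanced_block_py_alt
  dsimp only
  rw [pvFindOpen_eq sl oc cc start hpre]
  cases hfind : (PySem.List.pyRange start (sl.length : Int) 1).find?
      (fun k => PySem.Str.isIn oc ((PySem.List.pyGet? sl k).getD "")) with
  | none => rfl
  | some o =>
    dsimp only
    have hmem := List.mem_of_find?_eq_some hfind
    rw [PySem.List.mem_pyRange_one] at hmem
    obtain ⟨ho1, ho2⟩ := hmem
    have ho : -(sl.length : Int) ≤ o := by omega
    rw [pvFoldl_scan]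
    dsimp only
    rw [List.nil_append]
    set g : Int → Int := fun k =>
      (PySem.List.pyGet? (sl.map fun line =>
        (PySem.Str.count line oc : Int) - (PySem.Str.count line cc : Int)) k).getD 0 with hg
    set sums : List Int := pvScanSums g 0 (PySem.List.pyRange o (sl.length : Int) 1) with hsums
    have hglem : ∀ k : Int, -(sl.length : Int) ≤ k → k < (sl.length : Int) →
        g k = pvDelta sl oc cc k := by
      intro k h1 h2
      obtain ⟨line, hline⟩ := pvGet_some sl k h1 h2
      rw [hg]
      simp [pvPyGet_map, hline, pvDelta]
    have hkslen : (PySem.List.pyRange o (sl.length : Int) 1).length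
        = ((sl.length : Int) - o).toNat := PySem.List.length_pyRange_one ..
    have hlen : (sums.length : Int) = (sl.length : Int) - o := by
      rw [hsums, pvScanSums_length, hkslen]; omega
    have hstep : ∀ t : Nat, t + 1 < sums.length →
        sums.getD (t + 1) 0 = sums.getD t 0 + pvDelta sl oc cc (o + ((t + 1 : Nat) : Int)) := by
      intro t ht
      rw [hsums, pvScanSums_getD_succ g 0 _ t (by rw [← hsums]; omega),
        pvPyRange_getD o (sl.length : Int) (t + 1) (by omega),
        hglem (o + ((t + 1 : Nat) : Int)) (by push_cast; omega) (by push_cast; omega)]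
    have h0 : sums.getD 0 0 = pvDelta sl oc cc o := by
      rw [hsums, pvScanSums_getD_zero g 0 _ (by rw [← hsums]; omega),
        pvPyRange_getD o (sl.length : Int) 0 (by omega),
        hglem (o + ((0 : Nat) : Int)) (by push_cast; omega) (by push_cast; omega)]
      simp
    have hmain := pvScanBal_eq sl oc cc start o ho sums hlen hstep 1 le_rfl (by omega)
      (by intro u hu; omega) (by intro u h1 h2; omega)
    simp only [Option.map_some]
    rw [← h0]
    simpa [List.getD_eq_getElem?_getD] using hmain
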